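-- pv_equiv track=rewrite | github.com/betmma/Hyperbolic-Domain-Web-Version | tools/rewrite_goto_continue.py | previous_non_empty_line_start
-- ===== SOURCE A (Python) =====
-- def previous_non_empty_line_start(text: str, pos: int) -> int | None:
--     i = pos
--     if i > 0 and text[i - 1] == "\n":
--         i -= 1
--     while i >= 0:
--         start = text.rfind("\n", 0, i) + 1
--         end = text.find("\n", start)
--         if end == -1:
--             end = len(text)
--         line = text[start:end]
--         if line.strip():
--             return start
--         if start == 0:
--             break
--         i = start - 1
--     return None
-- ===== SOURCE B (Python) =====
-- def previous_non_empty_line_start(text: str, pos: int) -> int | None: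
--     # Precompute all line spans in one forward pass, then walk them backward.
--     i = pos
--     if i > 0 and text[i - 1] == "\n":
--         i -= 1
--     spans = []
--     s = 0
--     for j, c in enumerate(text):
--         if c == "\n":
--             spans.append((s, j))
--             s = j + 1
--     spans.append((s, len(text)))
--     for s, e in reversed(spans):
--         if s <= i and text[s:e].strip():
--             return s
--     return None
-- ===== Notes on version B (the rewrite author's own statement) =====
-- stated objective: alternative
-- what changed: Replaces A's backward rfind/find re-scanning loop with one forward pass that builds a list of (start,end) line spans and then walks that span index backward to the first non-blank line.
import Mathlib
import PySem

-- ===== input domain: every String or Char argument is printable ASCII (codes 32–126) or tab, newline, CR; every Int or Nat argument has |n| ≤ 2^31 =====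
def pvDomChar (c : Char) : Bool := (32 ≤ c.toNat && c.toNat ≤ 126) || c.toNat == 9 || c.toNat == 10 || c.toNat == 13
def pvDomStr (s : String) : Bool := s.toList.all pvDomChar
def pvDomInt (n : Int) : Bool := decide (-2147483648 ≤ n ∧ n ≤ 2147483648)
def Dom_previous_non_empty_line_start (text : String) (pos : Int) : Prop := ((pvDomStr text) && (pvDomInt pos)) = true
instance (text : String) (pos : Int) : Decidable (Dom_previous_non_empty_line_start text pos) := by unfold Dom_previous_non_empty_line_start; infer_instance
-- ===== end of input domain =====

-- B replaces A's backward rfind/find re-scanning loop by a single forward pass that builds a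
-- line-span index, then walks it backward (objective: alternative decomposition, same values).

-- ===== PORT A =====
-- A's while loop; fuel makes the recursion structural (each iteration strictly decreases i,
-- so fuel = i+1 always suffices and is what the port passes)
def pvALoop (t : List Char) : Nat → Int → Option Int
  | 0, _ => none
  | fuel+1, i =>
    if 0 ≤ i then
      let start := PySem.Chars.rfindFrom t ['\n'] 0 (some i) + 1
      let e0 := PySem.Chars.findFrom t ['\n'] start none
      let e := if e0 = -1 then ((t.length : Int)) else e0
      let line := PySem.Chars.slice t (some start) (some e)
      if PySem.Chars.strip line ≠ [] then some start
      else if start = 0 then none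
      else pvALoop t fuel (start - 1)
    else none

def previous_non_empty_line_start (text : String) (pos : Int) : Option Int :=
  let t := text.toList
  if 0 < pos then
    match PySem.List.pyGet? t (pos - 1) with
    | none => none   -- IndexError in Python (outside Pre_)
    | some c =>
      let i := if c = '\n' then pos - 1 else pos
      pvALoop t (i.toNat + 1) i
  else pvALoop t (pos.toNat + 1) pos

-- ===== PORT B =====
-- one step of B's forward pass over enumerate(text): close a span at each newline
def pvBStep (acc : List (Int × Int) × Int) (jc : Int × Char) : List (Int × Int) × Int :=
  if jc.2 = '\n' then (acc.1 ++ [(acc.2, jc.1)], jc.1 + 1) else acc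

-- B's backward walk over the reversed span list (the for-loop with early return)
def pvBScan (t : List Char) (i : Int) : List (Int × Int) → Option Int
  | [] => none
  | (s, e) :: rest =>
    if s ≤ i ∧ PySem.Chars.strip (PySem.Chars.slice t (some s) (some e)) ≠ [] then some s
    else pvBScan t i rest

def pvBMain (t : List Char) (i : Int) : Option Int :=
  let r := (PySem.List.enumerate t 0).foldl pvBStep ([], 0)
  let spans := r.1 ++ [(r.2, (t.length : Int))]
  pvBScan t i spans.reverse

def previous_non_empty_line_start_alt (text : String) (pos : Int) : Option Int :=
  let t := text.toList
  if 0 < pos then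
    match PySem.List.pyGet? t (pos - 1) with
    | none => none   -- IndexError in Python (outside Pre_)
    | some c => pvBMain t (if c = '\n' then pos - 1 else pos)
  else pvBMain t pos

-- ===== PRECONDITION & SPEC =====
-- Pre_ excludes exactly the inputs where Python A raises IndexError at text[pos-1]
-- (pos > len(text)); B raises there too.
def Pre_previous_non_empty_line_start (text : String) (pos : Int) : Prop :=
  pos ≤ PySem.Str.len text
instance (text : String) (pos : Int) : Decidable (Pre_previous_non_empty_line_start text pos) := by
  unfold Pre_previous_non_empty_line_start; infer_instance

def pvWitness_previous_non_empty_line_start : String × Int := ("a\n\nb", 4)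

def Spec_previous_non_empty_line_start (text : String) (pos : Int) (out : Option Int) : Prop := out = previous_non_empty_line_start_alt text pos
instance (text : String) (pos : Int) (out : Option Int) : Decidable (Spec_previous_non_empty_line_start text pos out) := by unfold Spec_previous_non_empty_line_start; infer_instance

-- ===== CLAIM (what is proved, stated in full; the proofs are below) =====
def Claim_equal_previous_non_empty_line_start : Prop := ∀ (text : String) (pos : Int), Dom_previous_non_empty_line_start text pos → Pre_previous_non_empty_line_start text pos → Spec_previous_non_empty_line_start text pos (previous_non_empty_line_start text pos)

-- ===== LEMMAS AND PROOFS =====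

-- "not a newline": the characters inside a line
def pvRunP : Char → Bool := fun c => !(c == '\n')
-- forward run of non-newline characters from index s
def pvFRun (t : List Char) (s : Nat) : Nat := ((t.drop s).takeWhile pvRunP).length
-- backward run of non-newline characters ending just before index i
def pvBRun (t : List Char) (i : Nat) : Nat := (((t.take i).reverse).takeWhile pvRunP).length
-- start and end of the line containing position i
def pvS (t : List Char) (i : Nat) : Nat := i - pvBRun t i
def pvE (t : List Char) (i : Nat) : Nat := pvS t i + pvFRun t (pvS t i)

-- recursive model of B's span construction (absolute positions)
def pvMkSpans : List Char → Nat → Nat → List (Int × Int)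
  | [], pos, start => [((start : Int), (pos : Int))]
  | c :: u, pos, start =>
    if c = '\n' then ((start : Int), (pos : Int)) :: pvMkSpans u (pos+1) (pos+1)
    else pvMkSpans u (pos+1) start

lemma pv_prefix_char (c : Char) (v : List Char) :
    List.isPrefixOf [c] v = true ↔ v.head? = some c := by
  cases v with
  | nil => simp [List.isPrefixOf]
  | cons h tl =>
    simp only [List.isPrefixOf, Bool.and_true, beq_iff_eq, List.head?_cons, Option.some_inj]
    exact eq_comm

lemma pvTW (p : Char → Bool) : ∀ (l : List Char) (m : Nat), m ≤ l.length →
    (∀ j, j < m → ∀ c, l[j]? = some c → p c = true) →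
    (m = l.length ∨ ∃ c, l[m]? = some c ∧ p c = false) →
    (l.takeWhile p).length = m := by
  intro l
  induction l with
  | nil => intro m hm _ _; simp at hm ⊢; omega
  | cons a l ih =>
    intro m hm hall hstop
    cases m with
    | zero =>
      rcases hstop with h | ⟨c, hc, hpc⟩
      · simp at h
      · simp at hc; subst hc; simp [List.takeWhile, hpc]
    | succ m =>
      have ha : p a = true := hall 0 (Nat.succ_pos _) a (by simp)
      simp only [List.takeWhile, ha]
      have := ih m (by simpa using hm)
        (fun j hj c hc => hall (j+1) (by omega) c (by simpa using hc))
        (by rcases hstop with h | ⟨c, hc, hpc⟩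
            · left; simpa using h
            · right; exact ⟨c, by simpa using hc, hpc⟩)
      simp [this]

lemma pv_find_go_nl (u : List Char) : ∀ k : Nat,
    PySem.Chars.find.go ['\n'] u k =
      if (u.takeWhile pvRunP).length = u.length then -1
      else ((k + (u.takeWhile pvRunP).length : Nat) : Int) := by
  induction u with
  | nil => intro k; simp [PySem.Chars.find.go, List.isEmpty]
  | cons a l ih =>
    intro k
    rw [PySem.Chars.find.go]
    by_cases ha : a = '\n'
    · subst ha
      have hpre : List.isPrefixOf ['\n'] ('\n' :: l) = true := by
        rw [pv_prefix_char]; simp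
      rw [hpre]
      have : pvRunP '\n' = false := by simp [pvRunP]
      simp [List.takeWhile, this]
    · have hpre : List.isPrefixOf ['\n'] (a :: l) = false := by
        rw [Bool.eq_false_iff]; intro h; rw [pv_prefix_char] at h; simp at h; exact ha h
      rw [hpre]
      simp only [Bool.false_eq_true, if_false]
      rw [ih (k+1)]
      have hr : pvRunP a = true := by simp [pvRunP, ha]
      simp only [List.takeWhile, hr]
      simp only [List.length_cons]
      split_ifs with h1 h2 h2 <;> try omega

lemma pv_find_nl (u : List Char) :
    PySem.Chars.find u ['\n'] =
      if (u.takeWhile pvRunP).length = u.length then -1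
      else (((u.takeWhile pvRunP).length : Nat) : Int) := by
  rw [PySem.Chars.find, pv_find_go_nl]; simp

lemma pv_rfind_go_nl (u : List Char) : ∀ j : Nat, j < u.length →
    PySem.Chars.rfind.go u ['\n'] j =
      ((j+1 : Nat) : Int) - ((((u.take (j+1)).reverse).takeWhile pvRunP).length : Int) - 1 := by
  intro j
  induction j with
  | zero =>
    intro hj
    rw [PySem.Chars.rfind.go]
    rcases List.exists_cons_of_ne_nil (List.ne_nil_of_length_pos hj) with ⟨a, l, rfl⟩
    by_cases ha : a = '\n'
    · subst ha
      have hpre : List.isPrefixOf ['\n'] ('\n' :: l) = true := by rw [pv_prefix_char]; simp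
      rw [hpre]
      have hb : pvRunP '\n' = false := by simp [pvRunP]
      simp [List.take, hb]
    · have hpre : List.isPrefixOf ['\n'] (a :: l) = false := by
        rw [Bool.eq_false_iff]; intro h; rw [pv_prefix_char] at h; simp at h; exact ha h
      rw [hpre]
      have hr : pvRunP a = true := by simp [pvRunP, ha]
      simp [List.take, List.takeWhile, hr]
  | succ j ih =>
    intro hj
    rw [PySem.Chars.rfind.go]
    by_cases hc : ∃ c, u[j+1]? = some c ∧ c = '\n'
    · rcases hc with ⟨c, hg, rfl⟩
      have hpre : List.isPrefixOf ['\n'] (u.drop (j+1)) = true := by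
        rw [pv_prefix_char]; rw [List.head?_drop]; exact hg
      rw [hpre]
      -- take (j+2) = take (j+1) ++ ['\n']  → reverse head is '\n' → takeWhile = []
      have ht : u.take (j+2) = u.take (j+1) ++ ['\n'] := by
        rw [List.take_add_one]; simp [hg]
      rw [ht]
      have hb : pvRunP '\n' = false := by simp [pvRunP]
      simp [hb]
    · push_neg at hc
      have hj1 : j + 1 < u.length := hj
      have hg : u[j+1]? = some (u[j+1]'hj1) := by simp
      have hne : (u[j+1]'hj1) ≠ '\n' := hc _ hg
      have hpre : List.isPrefixOf ['\n'] (u.drop (j+1)) = false := by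
        rw [Bool.eq_false_iff]; intro h; rw [pv_prefix_char] at h
        rw [List.head?_drop] at h; rw [hg] at h; exact hne (Option.some.inj h)
      rw [hpre]
      simp only [Bool.false_eq_true, if_false]
      rw [ih (by omega)]
      have ht : u.take (j+2) = u.take (j+1) ++ [u[j+1]'hj1] := by
        rw [List.take_add_one]; simp [hg]
      rw [ht]
      have hr : pvRunP (u[j+1]'hj1) = true := by simp [pvRunP, hne]
      have hlen : (List.takeWhile pvRunP ((u.take (j+1) ++ [u[j+1]'hj1]).reverse)).length
          = (List.takeWhile pvRunP (u.take (j+1)).reverse).length + 1 := by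
        rw [List.reverse_append]
        simp only [List.reverse_cons, List.reverse_nil, List.nil_append, List.singleton_append,
          List.takeWhile_cons, hr, if_true, List.length_cons]
      rw [hlen]; push_cast; ring

lemma pv_rfind_nl (u : List Char) :
    PySem.Chars.rfind u ['\n'] =
      ((u.length : Nat) : Int) - (((u.reverse.takeWhile pvRunP).length : Nat) : Int) - 1 := by
  cases u with
  | nil => simp [PySem.Chars.rfind, PySem.Chars.rfind.go, List.isPrefixOf]
  | cons a l =>
    rw [PySem.Chars.rfind]
    show PySem.Chars.rfind.go (a :: l) ['\n'] (l.length + 1) = _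
    rw [PySem.Chars.rfind.go]
    have hd : List.drop (l.length + 1) (a :: l) = [] := by simp
    rw [hd]
    have hp : List.isPrefixOf ['\n'] ([] : List Char) = false := by simp [List.isPrefixOf]
    rw [hp]
    simp only [Bool.false_eq_true, if_false]
    rw [pv_rfind_go_nl (a :: l) l.length (by simp)]
    have : List.take (l.length + 1) (a :: l) = a :: l := List.take_of_length_le (by simp)
    rw [this]
    simp

lemma pvBRun_le (t : List Char) (i : Nat) : pvBRun t i ≤ i := by
  unfold pvBRun
  have h := (List.takeWhile_prefix (l := (t.take i).reverse) (p := pvRunP)).length_le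
  simp at h; omega

lemma pvL1 (t : List Char) (i : Nat) (hi : i ≤ t.length) :
    PySem.Chars.rfindFrom t ['\n'] 0 (some (i : Int)) + 1 = ((pvS t i : Nat) : Int) := by
  have hb := pvBRun_le t i
  have h1 : ¬((t.length : Int) < (i : Int)) := by exact_mod_cast Nat.not_lt.mpr hi
  have h2 : ¬((i : Int) < 0) := by simp
  simp only [PySem.Chars.rfindFrom, h1, h2, if_false, lt_irrefl, Int.toNat_natCast,
    Int.toNat_zero, List.drop_zero]
  rw [pv_rfind_nl (t.take i)]
  have hlen : (List.take i t).length = i := by simp [hi]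
  rw [hlen]
  show (if ((i : Int) - (pvBRun t i : Int) - 1) = -1 then (-1 : Int)
        else 0 + ((i : Int) - (pvBRun t i : Int) - 1)) + 1 = ((pvS t i : Nat) : Int)
  unfold pvS
  split_ifs <;> push_cast <;> omega

lemma pvL2 (t : List Char) (i : Nat) (hS : pvS t i ≤ t.length) :
    (if PySem.Chars.findFrom t ['\n'] ((pvS t i : Nat) : Int) none = -1
     then ((t.length : Int)) else PySem.Chars.findFrom t ['\n'] ((pvS t i : Nat) : Int) none)
      = ((pvE t i : Nat) : Int) := by
  have hrun := (List.takeWhile_prefix (l := t.drop (pvS t i)) (p := pvRunP)).length_le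
  simp only [List.length_drop] at hrun
  rw [PySem.Chars.findFrom_natCast t ['\n'] (pvS t i) hS, pv_find_nl]
  by_cases hA : ((t.drop (pvS t i)).takeWhile pvRunP).length = (t.drop (pvS t i)).length
  · rw [if_pos hA]
    simp only [List.length_drop] at hA
    unfold pvE pvFRun
    simp
    omega
  · rw [if_neg hA]
    have hf : ¬((((t.drop (pvS t i)).takeWhile pvRunP).length : Int) = -1) := by omega
    rw [if_neg hf]
    have hne : ¬((pvS t i : Int) + (((t.drop (pvS t i)).takeWhile pvRunP).length : Int) = -1) := by
      omega
    rw [if_neg hne]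
    unfold pvE pvFRun
    push_cast
    ring

lemma pv_fold_spans : ∀ (u : List Char) (pos start : Nat) (acc : List (Int × Int)),
    ((PySem.List.enumerate u ((pos : Nat) : Int)).foldl pvBStep (acc, ((start : Nat) : Int))).1
      ++ [(((PySem.List.enumerate u ((pos : Nat) : Int)).foldl pvBStep (acc, ((start : Nat) : Int))).2,
           ((pos + u.length : Nat) : Int))]
    = acc ++ pvMkSpans u pos start := by
  intro u
  induction u with
  | nil => intro pos start acc; simp [PySem.List.enumerate_nil, pvMkSpans]
  | cons c u ih =>
    intro pos start acc
    rw [PySem.List.enumerate_cons, List.foldl_cons]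
    by_cases hc : c = '\n'
    · have hstep : pvBStep (acc, ((start : Nat) : Int)) (((pos : Nat) : Int), c)
          = (acc ++ [(((start : Nat) : Int), ((pos : Nat) : Int))], ((pos : Nat) : Int) + 1) := by
        simp [pvBStep, hc]
      rw [hstep]
      have hcast : ((pos : Nat) : Int) + 1 = (((pos + 1 : Nat)) : Int) := by push_cast; ring
      have hcast2 : pos + (c :: u).length = (pos + 1) + u.length := by simp; omega
      rw [hcast, hcast2, ih (pos+1) (pos+1) (acc ++ [(((start : Nat) : Int), ((pos : Nat) : Int))])]
      simp [pvMkSpans, hc]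
    · have hstep : pvBStep (acc, ((start : Nat) : Int)) (((pos : Nat) : Int), c)
          = (acc, ((start : Nat) : Int)) := by simp [pvBStep, hc]
      rw [hstep]
      have hcast2 : pos + (c :: u).length = (pos + 1) + u.length := by simp; omega
      have hcastE : ((pos : Nat) : Int) + 1 = (((pos+1 : Nat)) : Int) := by push_cast; ring
      rw [hcastE, hcast2, ih (pos+1) start acc]
      simp [pvMkSpans, hc]

lemma pv_mkSpans_fst_ge : ∀ (u : List Char) (pos start : Nat), start ≤ pos →
    ∀ p ∈ pvMkSpans u pos start, ((start : Nat) : Int) ≤ p.1 := by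
  intro u
  induction u with
  | nil => intro pos start hsp p hp; simp [pvMkSpans] at hp; subst hp; simp
  | cons c u ih =>
    intro pos start hsp p hp
    by_cases hc : c = '\n'
    · simp only [pvMkSpans, hc, if_true] at hp
      rcases List.mem_cons.1 hp with rfl | hp
      · simp
      · have := ih (pos+1) (pos+1) le_rfl p hp
        have : ((pos+1 : Nat) : Int) ≤ p.1 := this
        have hle : (start : Int) ≤ ((pos+1 : Nat) : Int) := by push_cast; omega
        omega
    · simp only [pvMkSpans, hc, if_false] at hp
      exact ih (pos+1) start (by omega) p hp

lemma pvS_eq (t : List Char) (i pos start : Nat)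
    (hnl : ∀ j, start ≤ j → j < pos → t[j]? ≠ some '\n')
    (hb : start = 0 ∨ t[start-1]? = some '\n')
    (hsi : start ≤ i) (hip : i ≤ pos) (hpl : pos ≤ t.length) :
    pvS t i = start := by
  have hil : i ≤ t.length := le_trans hip hpl
  have hlen : ((t.take i).reverse).length = i := by simp [hil]
  have hbr : pvBRun t i = i - start := by
    unfold pvBRun
    apply pvTW
    · omega
    · intro j hj c hc
      have hjl : j < ((t.take i).reverse).length := by omega
      rw [List.getElem?_reverse (by simpa [hil] using hjl)] at hc
      simp only [List.length_take] at hc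
      have hidx : min i t.length - 1 - j = i - 1 - j := by omega
      rw [hidx] at hc
      rw [List.getElem?_take_of_lt (by omega)] at hc
      have hk1 : start ≤ i - 1 - j := by omega
      have hk2 : i - 1 - j < pos := by omega
      have := hnl (i - 1 - j) hk1 hk2
      rw [hc] at this
      have hcne : c ≠ '\n' := fun h => this (by rw [h])
      simp [pvRunP, hcne]
    · by_cases h0 : start = 0
      · left; simp [hil]; omega
      · rcases hb with h0' | hbn
        · exact absurd h0' h0
        · right
          refine ⟨'\n', ?_, by simp [pvRunP]⟩
          rw [List.getElem?_reverse (by simp [hil]; omega)]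
          simp only [List.length_take]
          have hidx : min i t.length - 1 - (i - start) = start - 1 := by omega
          rw [hidx]
          rw [List.getElem?_take_of_lt (by omega)]
          exact hbn
  unfold pvS; omega

lemma pvFRun_eq (t : List Char) (pos start : Nat)
    (hnl : ∀ j, start ≤ j → j < pos → t[j]? ≠ some '\n')
    (hstop : pos = t.length ∨ t[pos]? = some '\n')
    (hsp : start ≤ pos) (hpl : pos ≤ t.length) :
    pvFRun t start = pos - start := by
  unfold pvFRun
  apply pvTW
  · simp; omega
  · intro j hj c hc
    rw [List.getElem?_drop] at hc
    have := hnl (start + j) (by omega) (by omega)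
    rw [hc] at this
    have hcne : c ≠ '\n' := fun h => this (by rw [h])
    simp [pvRunP, hcne]
  · rcases hstop with h0 | hbn
    · left; simp; omega
    · right
      refine ⟨'\n', ?_, by simp [pvRunP]⟩
      rw [List.getElem?_drop]
      have : start + (pos - start) = pos := by omega
      rw [this]
      exact hbn

lemma pvS_le (t : List Char) (i : Nat) : pvS t i ≤ i := Nat.sub_le _ _

lemma pv_rev_decomp (pre post : List (Int × Int)) (m : Int × Int) :
    (pre ++ m :: post).reverse = post.reverse ++ (m :: pre.reverse) := by
  simp

lemma pv_spans_split (t : List Char) : ∀ (u : List Char) (pos start i : Nat),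
    t.drop pos = u → pos ≤ t.length → start ≤ pos →
    (∀ j, start ≤ j → j < pos → t[j]? ≠ some '\n') →
    (start = 0 ∨ t[start-1]? = some '\n') →
    start ≤ i → i ≤ pos + u.length →
    ∃ pre post, pvMkSpans u pos start = pre ++ (((pvS t i : Nat) : Int), ((pvE t i : Nat) : Int)) :: post ∧
      start ≤ pvS t i ∧
      (∀ p ∈ pre, p.1 < ((pvS t i : Nat) : Int)) ∧
      (∀ p ∈ post, ((i : Nat) : Int) < p.1) ∧
      (pvS t i = 0 → pre = []) := by
  intro u
  induction u with
  | nil =>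
    intro pos start i hdrop hpl hsp hnl hb hsi hile
    have hln : t.length ≤ pos := List.drop_eq_nil_iff.mp hdrop
    have hpn : pos = t.length := by omega
    have hip : i ≤ pos := by simpa using hile
    have hS : pvS t i = start := pvS_eq t i pos start hnl hb hsi hip hpl
    have hE : pvE t i = pos := by
      unfold pvE
      rw [hS, pvFRun_eq t pos start hnl (Or.inl hpn) hsp hpl]
      omega
    exact ⟨[], [], by simp [pvMkSpans, hS, hE], by omega, by simp, by simp, by simp⟩
  | cons c u ih =>
    intro pos start i hdrop hpl hsp hnl hb hsi hile
    have hposlt : pos < t.length := by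
      rcases Nat.lt_or_ge pos t.length with h | h
      · exact h
      · exfalso
        have : t.drop pos = [] := List.drop_eq_nil_iff.mpr h
        rw [hdrop] at this; simp at this
    have hdrop' : t.drop (pos+1) = u := by
      have h1 := congrArg (List.drop 1) hdrop
      rw [List.drop_drop] at h1
      simpa [Nat.add_comm] using h1
    have hpos_get : t[pos]? = some c := by
      have h0 : (t.drop pos)[0]? = some c := by rw [hdrop]; rfl
      rwa [List.getElem?_drop, Nat.add_zero] at h0
    by_cases hc : c = '\n'
    · subst hc
      by_cases hi : i ≤ pos
      · have hS : pvS t i = start := pvS_eq t i pos start hnl hb hsi hi hpl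
        have hE : pvE t i = pos := by
          unfold pvE
          rw [hS, pvFRun_eq t pos start hnl (Or.inr hpos_get) hsp hpl]
          omega
        refine ⟨[], pvMkSpans u (pos+1) (pos+1), ?_, by omega, by simp, ?_, by simp⟩
        · simp [pvMkSpans, hS, hE]
        · intro p hp
          have h1 := pv_mkSpans_fst_ge u (pos+1) (pos+1) le_rfl p hp
          push_cast at h1 ⊢; omega
      · push_neg at hi
        have hnl' : ∀ j, pos+1 ≤ j → j < pos+1 → t[j]? ≠ some '\n' := by
          intro j h1 h2; exact absurd h2 (by omega)
        have hb' : pos+1 = 0 ∨ t[(pos+1)-1]? = some '\n' := by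
          right; simpa using hpos_get
        obtain ⟨pre', post', heq, hSs, hpre', hpost', hzero'⟩ :=
          ih (pos+1) (pos+1) i hdrop' hposlt le_rfl hnl' hb' (by omega) (by simp at hile ⊢; omega)
        refine ⟨((start : Int), (pos : Int)) :: pre', post', ?_, by omega, ?_, hpost', ?_⟩
        · simp [pvMkSpans, heq]
        · intro p hp
          rcases List.mem_cons.1 hp with rfl | hp
          · push_cast; omega
          · exact hpre' p hp
        · intro h0; exact absurd h0 (by omega)
    · have hnl' : ∀ j, start ≤ j → j < pos+1 → t[j]? ≠ some '\n' := by
        intro j h1 h2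
        rcases Nat.lt_or_ge j pos with h | h
        · exact hnl j h1 h
        · have hj : j = pos := by omega
          subst hj; rw [hpos_get]
          exact fun hh => hc (Option.some.inj hh)
      obtain ⟨pre, post, heq, hSs, hpre, hpost, hzero⟩ :=
        ih (pos+1) start i hdrop' hposlt (by omega) hnl' hb hsi (by simp at hile ⊢; omega)
      refine ⟨pre, post, ?_, hSs, hpre, hpost, hzero⟩
      simp [pvMkSpans, hc, heq]

lemma pv_scan_skip (t : List Char) (i : Int) : ∀ (l l2 : List (Int × Int)),
    (∀ p ∈ l, ¬ (p.1 ≤ i)) → pvBScan t i (l ++ l2) = pvBScan t i l2 := by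
  intro l
  induction l with
  | nil => intro l2 _; rfl
  | cons p l ih =>
    intro l2 h
    obtain ⟨s, e⟩ := p
    have hs : ¬(s ≤ i) := h (s, e) (by simp)
    simp only [List.cons_append, pvBScan]
    rw [if_neg (by intro hcon; exact hs hcon.1)]
    exact ih l2 (fun q hq => h q (List.mem_cons_of_mem _ hq))

lemma pv_scan_congr (t : List Char) (i i' : Int) : ∀ (l : List (Int × Int)),
    (∀ p ∈ l, p.1 ≤ i ∧ p.1 ≤ i') → pvBScan t i l = pvBScan t i' l := by
  intro l
  induction l with
  | nil => intro _; rfl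
  | cons p l ih =>
    intro h
    obtain ⟨s, e⟩ := p
    obtain ⟨h1, h2⟩ := h (s, e) (by simp)
    simp only [pvBScan]
    by_cases hC : PySem.Chars.strip (PySem.Chars.slice t (some s) (some e)) ≠ []
    · rw [if_pos ⟨h1, hC⟩, if_pos ⟨h2, hC⟩]
    · rw [if_neg (by intro hcon; exact hC hcon.2), if_neg (by intro hcon; exact hC hcon.2)]
      exact ih (fun q hq => h q (List.mem_cons_of_mem _ hq))

lemma pv_main (t : List Char) : ∀ (i : Nat), i ≤ t.length → ∀ fuel, i < fuel →
    pvALoop t fuel ((i : Nat) : Int) = pvBScan t ((i : Nat) : Int) (pvMkSpans t 0 0).reverse := by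
  intro i
  induction i using Nat.strong_induction_on with
  | _ i IH =>
    intro hi fuel hfuel
    obtain ⟨f, rfl⟩ : ∃ f, fuel = f + 1 := ⟨fuel - 1, by omega⟩
    obtain ⟨pre, post, heq, hSs, hpre, hpost, hzero⟩ :=
      pv_spans_split t t 0 0 i rfl (Nat.zero_le _) le_rfl
        (fun j h1 h2 => absurd h2 (by omega)) (Or.inl rfl) (Nat.zero_le i) (by simpa using hi)
    have hSle : pvS t i ≤ i := pvS_le t i
    have hSlen : pvS t i ≤ t.length := le_trans hSle hi
    rw [pvALoop]
    rw [if_pos (Int.natCast_nonneg i)]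
    simp only [pvL1 t i hi, pvL2 t i hSlen]
    rw [heq, pv_rev_decomp]
    rw [pv_scan_skip t ((i : Nat) : Int) post.reverse _
      (fun p hp => not_le.mpr (hpost p (List.mem_reverse.mp hp)))]
    simp only [pvBScan]
    by_cases hC : PySem.Chars.strip (PySem.Chars.slice t (some ((pvS t i : Nat) : Int))
        (some ((pvE t i : Nat) : Int))) ≠ []
    · rw [if_pos hC, if_pos ⟨by exact_mod_cast hSle, hC⟩]
    · have hnotB : ¬(((pvS t i : Nat) : Int) ≤ ((i : Nat) : Int) ∧
          PySem.Chars.strip (PySem.Chars.slice t (some ((pvS t i : Nat) : Int))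
            (some ((pvE t i : Nat) : Int))) ≠ []) := fun hcon => hC hcon.2
      rw [if_neg (by simpa using hC), if_neg hnotB]
      by_cases hS0 : pvS t i = 0
      · rw [if_pos (by exact_mod_cast hS0)]
        rw [hzero hS0]
        rfl
      · rw [if_neg (by exact_mod_cast hS0)]
        have hc1 : ((pvS t i : Nat) : Int) - 1 = (((pvS t i - 1 : Nat)) : Int) := by omega
        rw [hc1]
        rw [IH (pvS t i - 1) (by omega) (by omega) f (by omega)]
        rw [heq, pv_rev_decomp]
        have hskip : ∀ p ∈ post.reverse ++ [(((pvS t i : Nat) : Int), ((pvE t i : Nat) : Int))],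
            ¬ (p.1 ≤ (((pvS t i - 1 : Nat)) : Int)) := by
          intro p hp
          rcases List.mem_append.mp hp with hp | hp
          · have h1 := hpost p (List.mem_reverse.mp hp)
            intro hcon; push_cast at h1 hcon; omega
          · simp at hp; subst hp; intro hcon; push_cast at hcon; omega
        have hmid : (((pvS t i : Nat) : Int), ((pvE t i : Nat) : Int)) :: pre.reverse
            = [(((pvS t i : Nat) : Int), ((pvE t i : Nat) : Int))] ++ pre.reverse := rfl
        rw [hmid, ← List.append_assoc]
        rw [pv_scan_skip t _ _ _ hskip]
        apply pv_scan_congr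
        intro p hp
        have h1 := hpre p (List.mem_reverse.mp hp)
        constructor
        · push_cast at h1 ⊢; omega
        · push_cast at h1 ⊢; omega

lemma pv_bmain (t : List Char) (i : Int) :
    pvBMain t i = pvBScan t i (pvMkSpans t 0 0).reverse := by
  unfold pvBMain
  have h := pv_fold_spans t 0 0 []
  simp only [Nat.cast_zero, Nat.zero_add, List.nil_append] at h
  simp only []
  rw [h]

lemma pv_final (text : String) (pos : Int) (hpre : Pre_previous_non_empty_line_start text pos) :
    previous_non_empty_line_start text pos = previous_non_empty_line_start_alt text pos := by
  unfold previous_non_empty_line_start previous_non_empty_line_start_alt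
  have hlen : pos ≤ (text.toList.length : Int) := by
    unfold Pre_previous_non_empty_line_start at hpre
    simpa using hpre
  simp only []
  by_cases hp : 0 < pos
  · rw [if_pos hp, if_pos hp]
    obtain ⟨n, hn⟩ : ∃ n : Nat, pos - 1 = (n : Int) := ⟨(pos-1).toNat, by omega⟩
    have hnlt : n < text.toList.length := by omega
    have hg : PySem.List.pyGet? text.toList (pos - 1) = some (text.toList[n]'hnlt) := by
      rw [hn, PySem.List.pyGet?_natCast, List.getElem?_eq_getElem hnlt]
    rw [hg]
    simp only []
    by_cases hc : text.toList[n]'hnlt = '\n'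
    · rw [if_pos hc, hn, pv_bmain]
      have htn : ((n : Nat) : Int).toNat = n := by omega
      rw [htn]
      exact pv_main text.toList n (by omega) (n+1) (by omega)
    · rw [if_neg hc]
      obtain ⟨m, hm⟩ : ∃ m : Nat, pos = (m : Int) := ⟨pos.toNat, by omega⟩
      rw [hm, pv_bmain]
      have htm : ((m : Nat) : Int).toNat = m := by omega
      rw [htm]
      exact pv_main text.toList m (by omega) (m+1) (by omega)
  · rw [if_neg hp, if_neg hp]
    rcases lt_or_eq_of_le (not_lt.mp hp) with hneg | hzero
    · have ht : pos.toNat = 0 := by omega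
      rw [ht, pv_bmain, pvALoop]
      rw [if_neg (by omega)]
      have hskip := pv_scan_skip text.toList pos (pvMkSpans text.toList 0 0).reverse []
        (fun p hp' => by
          have h1 := pv_mkSpans_fst_ge text.toList 0 0 le_rfl p (List.mem_reverse.mp hp')
          intro hcon; simp at h1; omega)
      simp only [List.append_nil] at hskip
      rw [hskip]
      rfl
    · subst hzero
      rw [pv_bmain]
      have ht0 : (0 : Int).toNat = 0 := rfl
      rw [ht0]
      exact_mod_cast pv_main text.toList 0 (Nat.zero_le _) 1 (by omega)


-- ===== VERDICT (by name: the statement is the Claim_ definition above) =====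
theorem previous_non_empty_line_start_spec : Claim_equal_previous_non_empty_line_start := by
  intro text pos _hdom hpre
  unfold Spec_previous_non_empty_line_start
  exact pv_final text pos hpre
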